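-- pv_equiv track=rewrite | github.com/itamba/Multi_Agent_Task_Allocation_and_Adaptation | src/match_aou/utils/topology_utils.py | levels_to_layers
-- ===== SOURCE A (Python) =====
-- from typing import DefaultDict, Deque, Dict, Iterable, List, Sequence, Tuple
--
-- def levels_to_layers(level_by_task: Dict[int, int]) -> List[List[int]]:
--     """Convert a level map into a list of layers (sorted within each layer)."""
--     if not level_by_task:
--         return []
--
--     max_level = max(level_by_task.values())
--     layers: List[List[int]] = [[] for _ in range(max_level + 1)]
--     for t, lvl in level_by_task.items():
--         layers[lvl].append(t)
--
--     for layer in layers: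
--         layer.sort()
--
--     return layers
-- ===== SOURCE B (Python) =====
-- def levels_to_layers(level_by_task):
--     """Convert a level map into a list of layers (sorted within each layer)."""
--     if not level_by_task:
--         return []
--
--     max_level = max(level_by_task.values())
--     result = [[] for _ in range(max_level + 1)]
--     items = sorted(level_by_task.items(), key=lambda kv: (kv[1], kv[0]))
--     i = 0
--     n = len(items)
--     while i < n:
--         lvl = items[i][1]
--         j = i
--         while j < n and items[j][1] == lvl:
--             j += 1
--         result[lvl] = [t for t, _ in items[i:j]]
--         i = j
--     return result
-- ===== Notes on version B (the rewrite author's own statement) =====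
-- stated objective: alternative
-- what changed: Instead of scattering tasks into max_level+1 buckets and then sorting every bucket, B sorts the items once globally by (level, task), scans that sorted stream run by run (a two-index groupby loop), and assigns each run's already-ordered task ids into the pre-sized result list at its level.
-- outside the precondition, e.g. on levels_to_layers({1: -1, 2: 1}): A returns [[], [1, 2]], B returns [[], [2]]
import Mathlib
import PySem

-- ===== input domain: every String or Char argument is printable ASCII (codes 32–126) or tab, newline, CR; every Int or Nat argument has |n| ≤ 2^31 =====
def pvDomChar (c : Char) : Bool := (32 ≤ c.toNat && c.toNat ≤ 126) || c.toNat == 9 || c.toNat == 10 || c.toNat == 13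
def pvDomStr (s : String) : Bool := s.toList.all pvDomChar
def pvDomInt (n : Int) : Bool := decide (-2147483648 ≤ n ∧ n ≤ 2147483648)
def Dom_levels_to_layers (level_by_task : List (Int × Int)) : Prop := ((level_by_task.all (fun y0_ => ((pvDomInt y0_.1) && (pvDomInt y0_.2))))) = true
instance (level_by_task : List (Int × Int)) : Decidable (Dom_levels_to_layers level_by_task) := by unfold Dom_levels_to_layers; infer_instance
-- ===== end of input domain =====

-- B replaces A's scatter-into-buckets-then-sort-each-bucket by one global sort of the
-- items by (level, task) scanned run by run, each run assigned into a pre-sized result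
-- list at its level (objective: alternative algorithm, similar cost).

-- ===== PORT A =====
def levels_to_layers (level_by_task : List (Int × Int)) : List (List Int) :=
  let d := PySem.Dict.ofList level_by_task
  if d.items = [] then []
  else
    match PySem.List.max? d.values (fun x => x) with
    | none => []        -- unreachable: the dict is non-empty, so max? returns some
    | some max_level =>
      let layers0 : List (List Int) :=
        (PySem.List.pyRange 0 (max_level + 1) 1).map (fun _ => ([] : List Int))
      -- for t, lvl in items: layers[lvl].append(t)   (total index forms, exact under Pre_)
      let layers := d.items.foldl
        (fun ls p => PySem.List.pySetD ls p.2 (PySem.List.pyGetD ls p.2 [] ++ [p.1])) layers0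
      layers.map (fun layer => PySem.List.sorted layer (fun x => x))

-- ===== PORT B =====
-- the run-scanning while loop of Source B: consecutive items of equal level become one
-- group (level, task ids of the run); the inner 'while j < n and items[j][1] == lvl'
-- is the takeWhile, restarting the outer loop at j is the dropWhile
def pvRunsB : List (Int × Int) → List (Int × List Int)
  | [] => []
  | (t, l) :: xs =>
    (l, t :: (xs.takeWhile (fun p => p.2 == l)).map (fun p => p.1)) ::
      pvRunsB (xs.dropWhile (fun p => p.2 == l))
termination_by xs => xs.length
decreasing_by
  simp only [List.length_cons]
  exact Nat.lt_succ_of_le (xs.length_dropWhile_le _)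

def levels_to_layers_alt (level_by_task : List (Int × Int)) : List (List Int) :=
  let d := PySem.Dict.ofList level_by_task
  if d.items = [] then []
  else
    match PySem.List.max? d.values (fun x => x) with
    | none => []        -- unreachable: the dict is non-empty, so max? returns some
    | some max_level =>
      let result0 : List (List Int) :=
        (PySem.List.pyRange 0 (max_level + 1) 1).map (fun _ => ([] : List Int))
      -- outer while loop: result[lvl] = [t for t, _ in items[i:j]]  (total index form, exact under Pre_)
      (pvRunsB (PySem.List.sorted2 d.items (fun kv => kv.2) (fun kv => kv.1))).foldl
        (fun ls g => PySem.List.pySetD ls g.1 g.2) result0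

-- ===== PRECONDITION & SPEC =====
-- Pre_ restricts to nonnegative levels, the natural domain of a level map: on a negative
-- level Python's negative indexing makes both programs wrap the run onto a high layer
-- (or raise IndexError), an accidental corner where A's merge-then-sort and B's
-- overwrite are equally arbitrary, so those inputs are excluded.
def Pre_levels_to_layers (level_by_task : List (Int × Int)) : Prop :=
  ∀ p ∈ level_by_task, 0 ≤ p.2
instance (level_by_task : List (Int × Int)) : Decidable (Pre_levels_to_layers level_by_task) := by unfold Pre_levels_to_layers; infer_instance

def pvWitness_levels_to_layers : (List (Int × Int)) := [(3, 0), (1, 2), (2, 0)]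

def Spec_levels_to_layers (level_by_task : List (Int × Int)) (out : List (List Int)) : Prop := out = levels_to_layers_alt level_by_task
instance (level_by_task : List (Int × Int)) (out : List (List Int)) : Decidable (Spec_levels_to_layers level_by_task out) := by unfold Spec_levels_to_layers; infer_instance

-- ===== CLAIM (what is proved, stated in full; the proofs are below) =====
def Claim_equal_levels_to_layers : Prop := ∀ (level_by_task : List (Int × Int)), Dom_levels_to_layers level_by_task → Pre_levels_to_layers level_by_task → Spec_levels_to_layers level_by_task (levels_to_layers level_by_task)

-- ===== LEMMAS AND PROOFS =====

-- every item pair of dict(level_by_task) satisfies any predicate all input pairs satisfy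
theorem mem_items_ofList_pred (P : Int × Int → Prop) :
    ∀ (l : List (Int × Int)) (d : PySem.Dict Int Int),
      (∀ p ∈ d.items, P p) → (∀ p ∈ l, P p) →
      ∀ p ∈ (l.foldl (fun d q => d.insert q.1 q.2) d).items, P p := by
  intro l
  induction l with
  | nil => intro d hd _ p hp; exact hd p hp
  | cons q l ih =>
    intro d hd hl p hp
    refine ih (d.insert q.1 q.2) ?_ (fun r hr => hl r (List.mem_cons_of_mem _ hr)) p hp
    intro r hr
    rcases (PySem.Dict.mem_items_insert d q.1 q.2 r).mp hr with h | h
    · subst h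
      have := hl q (List.mem_cons_self ..)
      simpa using this
    · exact hd r h.1

theorem ofList_eq_foldl_insert (l : List (Int × Int)) :
    PySem.Dict.ofList l = l.foldl (fun d q => d.insert q.1 q.2) PySem.Dict.empty := rfl

-- the scatter loop preserves the number of layers
theorem scatter_length (l : List (Int × Int)) :
    ∀ (ls : List (List Int)),
      (l.foldl (fun ls p => PySem.List.pySetD ls p.2 (PySem.List.pyGetD ls p.2 [] ++ [p.1])) ls).length
        = ls.length := by
  induction l with
  | nil => intro ls; rfl
  | cons q l ih => intro ls; simp only [List.foldl_cons]; rw [ih]; exact PySem.List.length_pySetD ..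

-- the scatter loop: layer i collects the first components of the pairs with level i, in order
theorem scatter_getD (l : List (Int × Int)) :
    ∀ (ls : List (List Int)),
      (∀ p ∈ l, 0 ≤ p.2 ∧ p.2 < (ls.length : Int)) →
      ∀ (i : Nat),
        (l.foldl (fun ls p => PySem.List.pySetD ls p.2 (PySem.List.pyGetD ls p.2 [] ++ [p.1])) ls).getD i []
          = ls.getD i [] ++ (l.filter (fun p => p.2 == (i : Int))).map (fun p => p.1) := by
  induction l with
  | nil => intro ls _ i; simp
  | cons q l ih =>
    intro ls h i
    obtain ⟨h0, h1⟩ := h q (List.mem_cons_self ..)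
    have hqlt : q.2.toNat < ls.length := by omega
    simp only [List.foldl_cons]
    rw [PySem.List.pyGetD_eq_getElem _ _ h0 h1, PySem.List.pySetD_of_nonneg _ _ h0]
    rw [ih _ (by intro p hp; have := h p (List.mem_cons_of_mem _ hp); simpa [List.length_set] using this) i]
    rw [List.filter_cons]
    by_cases hiq : i = q.2.toNat
    · subst hiq
      have hbeq : (q.2 == ((q.2.toNat : Nat) : Int)) = true := by simp; omega
      simp only [hbeq]
      rw [List.getD_eq_getElem _ _ (by simpa [List.length_set] using hqlt),
          List.getD_eq_getElem _ _ hqlt, List.getElem_set_self]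
      simp
    · have hbeq : (q.2 == ((i : Nat) : Int)) = false := by simp; omega
      simp only [hbeq, Bool.false_eq_true]
      congr 1
      by_cases hilen : i < ls.length
      · rw [List.getD_eq_getElem _ _ (by simpa [List.length_set] using hilen),
            List.getD_eq_getElem _ _ hilen, List.getElem_set_ne (by omega)]
      · rw [List.getD_eq_default _ _ (by simp [List.length_set]; omega), List.getD_eq_default _ _ (by omega)]

-- sorted2 by the two keys (level, task) is sorted by the lexicographic key
theorem sorted2_eq_sorted_lex (xs : List (Int × Int)) :
    PySem.List.sorted2 xs (fun kv => kv.2) (fun kv => kv.1)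
      = PySem.List.sorted xs (fun kv => toLex (kv.2, kv.1)) := by
  have hb : (fun (a b : Int × Int) =>
        (decide (a.2 < b.2) || (!decide (b.2 < a.2) && decide (a.1 < b.1))))
      = (fun (a b : Int × Int) => decide (toLex (a.2, a.1) < toLex (b.2, b.1))) := by
    funext a b
    by_cases h1 : a.2 < b.2 <;> by_cases h2 : b.2 < a.2 <;> by_cases h3 : a.1 < b.1 <;>
      simp [h1, h2, h3, Prod.Lex.lt_iff] <;> omega
  unfold PySem.List.sorted2 PySem.List.sorted
  simp only [Bool.false_eq_true, reduceIte]
  rw [hb]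

-- sorting each bucket separately = filtering the globally (level, task)-sorted items
theorem sorted_filter_level (items : List (Int × Int))
    (hnd : (items.map (fun p => p.1)).Nodup) (c : Int) :
    PySem.List.sorted ((items.filter (fun p => p.2 == c)).map (fun p => p.1)) (fun x => x)
      = ((PySem.List.sorted2 items (fun kv => kv.2) (fun kv => kv.1)).filter
          (fun p => p.2 == c)).map (fun p => p.1) := by
  set S := PySem.List.sorted2 items (fun kv => kv.2) (fun kv => kv.1) with hS
  have hperm : S.Perm items := PySem.List.sorted2_perm items _ _ false
  apply PySem.List.sorted_eq_of_perm_of_pairwise_lt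
  · exact (hperm.filter _).map _
  · have hpair : S.Pairwise (fun a b => toLex (a.2, a.1) ≤ toLex (b.2, b.1)) := by
      rw [hS, sorted2_eq_sorted_lex]
      exact PySem.List.sorted_pairwise items (fun kv => toLex (kv.2, kv.1))
    have hfil : (S.filter (fun p => p.2 == c)).Pairwise
        (fun a b => toLex (a.2, a.1) ≤ toLex (b.2, b.1)) :=
      hpair.sublist List.filter_sublist
    have hndS : (S.map (fun p => p.1)).Nodup := ((hperm.map _).nodup_iff).mpr hnd
    have hndF : ((S.filter (fun p => p.2 == c)).map (fun p => p.1)).Nodup :=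
      (List.filter_sublist.map _).nodup hndS
    have hne : (S.filter (fun p => p.2 == c)).Pairwise (fun a b => a.1 ≠ b.1) := by
      rw [← List.pairwise_map]; exact hndF
    rw [List.pairwise_map]
    refine (hfil.and hne).imp_of_mem ?_
    intro a b ha hb hab
    have ha2 : a.2 = c := by simpa using (List.of_mem_filter ha)
    have hb2 : b.2 = c := by simpa using (List.of_mem_filter hb)
    rcases Prod.Lex.le_iff.mp hab.1 with h | h
    · exfalso; rw [ha2, hb2] at h; exact lt_irrefl _ h
    · exact lt_of_le_of_ne h.2 hab.2

-- overwriting the same slot twice keeps only the second value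
theorem pySetD_pySetD (ls : List (List Int)) (l : Int) (h0 : 0 ≤ l) (v w : List Int) :
    PySem.List.pySetD (PySem.List.pySetD ls l v) l w = PySem.List.pySetD ls l w := by
  rw [PySem.List.pySetD_of_nonneg _ _ h0, PySem.List.pySetD_of_nonneg _ _ h0,
      PySem.List.pySetD_of_nonneg _ _ h0, List.set_set]

theorem pyGetD_pySetD_self (ls : List (List Int)) (l : Int) (h0 : 0 ≤ l)
    (h1 : l < (ls.length : Int)) (v : List Int) :
    PySem.List.pyGetD (PySem.List.pySetD ls l v) l [] = v := by
  rw [PySem.List.pySetD_of_nonneg _ _ h0,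
      PySem.List.pyGetD_eq_getElem _ _ h0 (by simpa [List.length_set] using h1)]
  exact List.getElem_set_self (by simpa using (by omega : l.toNat < ls.length))

theorem pyGetD_pySetD_ne (ls : List (List Int)) (l k : Int) (h0 : 0 ≤ l) (hk0 : 0 ≤ k)
    (hne : k ≠ l) (v : List Int) :
    PySem.List.pyGetD (PySem.List.pySetD ls l v) k [] = PySem.List.pyGetD ls k [] := by
  rw [PySem.List.pySetD_of_nonneg _ _ h0]
  by_cases hk1 : k < (ls.length : Int)
  · rw [PySem.List.pyGetD_eq_getElem _ _ hk0 (by simpa [List.length_set] using hk1),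
        PySem.List.pyGetD_eq_getElem _ _ hk0 hk1,
        List.getElem_set_ne (by omega)]
  · rw [PySem.List.pyGetD_of_none, PySem.List.pyGetD_of_none]
    all_goals simp [PySem.List.pyGet?, PySem.List.pyIdx?, List.length_set]
    all_goals intro a; simp [hk0, hk1]

-- A's append-scatter over a constant-level run appends the run's task ids to that slot
theorem scatter_run (l : Int) (h0 : 0 ≤ l) :
    ∀ (run : List (Int × Int)) (ls : List (List Int)), (∀ p ∈ run, p.2 = l) →
      l < (ls.length : Int) →
      run.foldl (fun ls p => PySem.List.pySetD ls p.2 (PySem.List.pyGetD ls p.2 [] ++ [p.1])) ls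
        = PySem.List.pySetD ls l (PySem.List.pyGetD ls l [] ++ run.map (fun p => p.1)) := by
  intro run
  induction run with
  | nil =>
    intro ls _ h1
    rw [List.foldl_nil, List.map_nil, List.append_nil, PySem.List.pySetD_of_nonneg _ _ h0,
        PySem.List.pyGetD_eq_getElem _ _ h0 h1, List.set_getElem_self]
  | cons q run ih =>
    intro ls hrun h1
    have hq : q.2 = l := hrun q (List.mem_cons_self ..)
    simp only [List.foldl_cons, hq]
    rw [ih _ (fun p hp => hrun p (List.mem_cons_of_mem _ hp))
          (by rw [PySem.List.length_pySetD]; exact h1)]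
    rw [pyGetD_pySetD_self ls l h0 h1, pySetD_pySetD ls l h0]
    simp

-- B's run-by-run overwrite over level-sorted items whose slots are empty equals A's
-- element-by-element append-scatter over the same items
theorem runs_fold_eq :
    ∀ (S : List (Int × Int)) (ls : List (List Int)),
      S.Pairwise (fun a b => a.2 ≤ b.2) →
      (∀ p ∈ S, 0 ≤ p.2 ∧ p.2 < (ls.length : Int)) →
      (∀ p ∈ S, PySem.List.pyGetD ls p.2 [] = []) →
      (pvRunsB S).foldl (fun ls g => PySem.List.pySetD ls g.1 g.2) ls
        = S.foldl (fun ls p => PySem.List.pySetD ls p.2 (PySem.List.pyGetD ls p.2 [] ++ [p.1])) ls := by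
  intro S
  induction S using pvRunsB.induct with
  | case1 => intro ls _ _ _; rw [pvRunsB]; rfl
  | case2 t l xs ih =>
    intro ls hs hr he
    obtain ⟨h0, h1⟩ := hr (t, l) (List.mem_cons_self ..)
    simp only at h0 h1
    have hxs := xs.takeWhile_append_dropWhile (p := fun p => p.2 == l)
    -- every element of the takeWhile run has level l
    have htkl : ∀ p ∈ xs.takeWhile (fun p => p.2 == l), p.2 = l := by
      intro p hp
      simpa using List.mem_takeWhile_imp hp
    have hdrxs : ∀ p ∈ xs.dropWhile (fun p => p.2 == l), p ∈ xs :=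
      fun p hp => (xs.dropWhile_sublist _).mem hp
    have hpair_xs : xs.Pairwise (fun a b => a.2 ≤ b.2) := (List.pairwise_cons.mp hs).2
    have hge : ∀ p ∈ xs, l ≤ p.2 := (List.pairwise_cons.mp hs).1
    -- every element after the run has level ≠ l
    have hdrne : ∀ p ∈ xs.dropWhile (fun p => p.2 == l), p.2 ≠ l := by
      intro p hp
      have hpd : (xs.dropWhile (fun p => p.2 == l)).Pairwise (fun a b => a.2 ≤ b.2) :=
        hpair_xs.sublist (xs.dropWhile_sublist _)
      cases hcd : xs.dropWhile (fun p => p.2 == l) with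
      | nil => rw [hcd] at hp; simp at hp
      | cons d rest =>
        have hdhead : ¬ (d.2 == l) = true := by
          have := List.head?_dropWhile_not (fun p => p.2 == l) xs
          rw [hcd] at this
          simpa using this
        have hdne : d.2 ≠ l := by simpa using hdhead
        have hdl : l < d.2 :=
          lt_of_le_of_ne (hge d (hdrxs d (hcd ▸ List.mem_cons_self ..))) (Ne.symm hdne)
        rw [hcd] at hp
        rcases List.mem_cons.mp hp with h | h
        · rw [h]; exact hdne
        · have : d.2 ≤ p.2 := by
            rw [hcd] at hpd
            exact (List.pairwise_cons.mp hpd).1 p h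
          omega
    have hehead : PySem.List.pyGetD ls l [] = [] := by
      have := he (t, l) (List.mem_cons_self ..); simpa using this
    -- A's scatter over (t,l) then the takeWhile run collapses to one pySetD
    have hstep : (xs.takeWhile (fun p => p.2 == l)).foldl
          (fun ls p => PySem.List.pySetD ls p.2 (PySem.List.pyGetD ls p.2 [] ++ [p.1]))
          (PySem.List.pySetD ls l (PySem.List.pyGetD ls l [] ++ [t]))
        = PySem.List.pySetD ls l (t :: (xs.takeWhile (fun p => p.2 == l)).map (fun p => p.1)) := by
      rw [scatter_run l h0 _ _ htkl (by rw [PySem.List.length_pySetD]; exact h1)]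
      rw [pyGetD_pySetD_self ls l h0 h1, pySetD_pySetD ls l h0, hehead]
      simp
    rw [pvRunsB]
    conv_rhs => rw [← hxs]
    simp only [List.foldl_cons, List.foldl_append]
    rw [hstep]
    -- apply the induction hypothesis on the remainder from the updated list
    refine ih (PySem.List.pySetD ls l (t :: (xs.takeWhile (fun p => p.2 == l)).map (fun p => p.1)))
      (hpair_xs.sublist (xs.dropWhile_sublist _)) ?_ ?_
    · intro p hp
      have := hr p (List.mem_cons_of_mem _ (hdrxs p hp))
      rwa [PySem.List.length_pySetD]
    · intro p hp
      rw [pyGetD_pySetD_ne ls l p.2 h0 (hr p (List.mem_cons_of_mem _ (hdrxs p hp))).1 (hdrne p hp)]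
      exact he p (List.mem_cons_of_mem _ (hdrxs p hp))

theorem main_eq (lbt : List (Int × Int)) (hpre : ∀ p ∈ lbt, 0 ≤ p.2) :
    levels_to_layers lbt = levels_to_layers_alt lbt := by
  unfold levels_to_layers levels_to_layers_alt
  set d := PySem.Dict.ofList lbt with hd
  by_cases hemp : d.items = []
  · simp [hemp]
  · simp only [if_neg hemp]
    have hP : ∀ p ∈ d.items, 0 ≤ p.2 := by
      rw [hd, ofList_eq_foldl_insert]
      exact mem_items_ofList_pred _ lbt PySem.Dict.empty (by simp [PySem.Dict.empty]) hpre
    have hvals : d.values ≠ [] := by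
      have : d.values = d.items.map (fun p => p.2) := rfl
      rw [this]; simpa using hemp
    obtain ⟨m, hm⟩ : ∃ m, PySem.List.max? d.values (fun x => x) = some m := by
      cases hmx : PySem.List.max? d.values (fun x => x) with
      | none => exact absurd ((PySem.List.max?_eq_none_iff _ _).mp hmx) hvals
      | some m => exact ⟨m, rfl⟩
    simp only [hm]
    have hmv : m ∈ d.values := PySem.List.max?_mem hm
    have hm0 : 0 ≤ m := by
      have : d.values = d.items.map (fun p => p.2) := rfl
      rw [this] at hmv
      obtain ⟨p, hp, hpe⟩ := List.mem_map.mp hmv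
      exact hpe ▸ hP p hp
    have hle : ∀ p ∈ d.items, p.2 ≤ m := by
      intro p hp
      have : p.2 ∈ d.values := by
        have hv : d.values = d.items.map (fun p => p.2) := rfl
        rw [hv]; exact List.mem_map.mpr ⟨p, hp, rfl⟩
      exact PySem.List.max?_isMax hm _ this
    have hlen0 : ((PySem.List.pyRange 0 (m + 1) 1).map (fun _ => ([] : List Int))).length
        = (m + 1).toNat := by
      rw [List.length_map, PySem.List.length_pyRange_one]; omega
    set S := PySem.List.sorted2 d.items (fun kv => kv.2) (fun kv => kv.1) with hS
    have hperm : S.Perm d.items := PySem.List.sorted2_perm d.items _ _ false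
    have hSmem : ∀ p ∈ S, p ∈ d.items := fun p hp => hperm.mem_iff.mp hp
    have hSpair : S.Pairwise (fun a b => a.2 ≤ b.2) := by
      have hpair : S.Pairwise (fun a b => toLex (a.2, a.1) ≤ toLex (b.2, b.1)) := by
        rw [hS, sorted2_eq_sorted_lex]
        exact PySem.List.sorted_pairwise d.items (fun kv => toLex (kv.2, kv.1))
      refine hpair.imp ?_
      intro a b h
      rcases Prod.Lex.le_iff.mp h with h | h
      · exact le_of_lt h
      · exact le_of_eq h.1
    have hSrange : ∀ p ∈ S, 0 ≤ p.2 ∧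
        p.2 < (((PySem.List.pyRange 0 (m + 1) 1).map (fun _ => ([] : List Int))).length : Int) := by
      intro p hp
      have h3 := hP p (hSmem p hp); have h4 := hle p (hSmem p hp)
      rw [hlen0]; refine ⟨h3, ?_⟩; omega
    have hSempty : ∀ p ∈ S,
        PySem.List.pyGetD ((PySem.List.pyRange 0 (m + 1) 1).map (fun _ => ([] : List Int))) p.2 [] = [] := by
      intro p hp
      have h3 := hP p (hSmem p hp); have h4 := hle p (hSmem p hp)
      exact PySem.List.pyGetD_map_pyRange_of_nonneg _ _ _ _ h3 (by omega)
    -- B's run fold = A's scatter over the sorted items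
    rw [runs_fold_eq S _ hSpair hSrange hSempty]
    apply List.ext_getElem
    · rw [List.length_map, scatter_length, hlen0, scatter_length, hlen0]
    · intro i h1 h2
      rw [List.length_map, scatter_length, hlen0] at h1
      rw [List.getElem_map]
      have hA : (d.items.foldl
            (fun ls p => PySem.List.pySetD ls p.2 (PySem.List.pyGetD ls p.2 [] ++ [p.1]))
            ((PySem.List.pyRange 0 (m + 1) 1).map (fun _ => ([] : List Int))))[i]'(by
              rw [scatter_length, hlen0]; exact h1)
          = (d.items.filter (fun p => p.2 == (i : Int))).map (fun p => p.1) := by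
        rw [← List.getD_eq_getElem _ [] (by rw [scatter_length, hlen0]; exact h1)]
        rw [scatter_getD _ _ (by intro p hp; have h3 := hP p hp; have h4 := hle p hp; rw [hlen0]; omega) i]
        rw [List.getD_eq_getElem _ _ (by rw [hlen0]; exact h1)]
        simp
      have hB : (S.foldl
            (fun ls p => PySem.List.pySetD ls p.2 (PySem.List.pyGetD ls p.2 [] ++ [p.1]))
            ((PySem.List.pyRange 0 (m + 1) 1).map (fun _ => ([] : List Int))))[i]'(by
              rw [scatter_length, hlen0]; exact h1)
          = (S.filter (fun p => p.2 == (i : Int))).map (fun p => p.1) := by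
        rw [← List.getD_eq_getElem _ [] (by rw [scatter_length, hlen0]; exact h1)]
        rw [scatter_getD _ _ hSrange i]
        rw [List.getD_eq_getElem _ _ (by rw [hlen0]; exact h1)]
        simp
      rw [hA, hB]
      have hnd : (d.items.map (fun p => p.1)).Nodup := by
        have : d.keys = d.items.map (fun p => p.1) := rfl
        rw [← this]; exact PySem.Dict.nodup_keys_ofList lbt
      exact sorted_filter_level d.items hnd (i : Int)

-- ===== VERDICT (by name: the statement is the Claim_ definition above) =====
theorem levels_to_layers_spec : Claim_equal_levels_to_layers := by
  intro lbt _ hpre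
  unfold Spec_levels_to_layers
  exact main_eq lbt hpre
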